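-- pv_equiv track=rewrite | github.com/saied83/algorithm-BRACU221 | LAB03/evaluation.py | swapBlackTilesNk
-- ===== SOURCE A (Python) =====
-- def swapBlackTilesNk(l, arr, k):
--     pointer1, pointer2 = 0, k-1
--     min = k
--     while pointer2 < l:
--         count = 0
--         for i in range(k):
--             if arr[pointer1+i] == 1:
--                 count += 1
--         if count < min:
--             min = count
--         pointer1 +=1
--         pointer2 +=1
--     return min
-- ===== SOURCE B (Python) =====
-- def swapBlackTilesNk(l, arr, k):
--     best = k
--     if 0 < k <= l:
--         count = sum(1 for x in arr[:k] if x == 1)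
--         if count < best:
--             best = count
--         for p in range(1, l - k + 1):
--             count += (arr[p + k - 1] == 1) - (arr[p - 1] == 1)
--             if count < best:
--                 best = count
--     return best
-- ===== Notes on version B (the rewrite author's own statement) =====
-- stated objective: alternative
-- what changed: Replaces A's per-window recount (nested loop over each window) with a single sliding-window pass that updates the window count incrementally (add the entering element, drop the leaving one); intended as asymptotically cheaper (O(l) vs O(l*k)) but a timing run's random inputs could not confirm a measured speed-up, so no speed is claimed.
import Mathlib
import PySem

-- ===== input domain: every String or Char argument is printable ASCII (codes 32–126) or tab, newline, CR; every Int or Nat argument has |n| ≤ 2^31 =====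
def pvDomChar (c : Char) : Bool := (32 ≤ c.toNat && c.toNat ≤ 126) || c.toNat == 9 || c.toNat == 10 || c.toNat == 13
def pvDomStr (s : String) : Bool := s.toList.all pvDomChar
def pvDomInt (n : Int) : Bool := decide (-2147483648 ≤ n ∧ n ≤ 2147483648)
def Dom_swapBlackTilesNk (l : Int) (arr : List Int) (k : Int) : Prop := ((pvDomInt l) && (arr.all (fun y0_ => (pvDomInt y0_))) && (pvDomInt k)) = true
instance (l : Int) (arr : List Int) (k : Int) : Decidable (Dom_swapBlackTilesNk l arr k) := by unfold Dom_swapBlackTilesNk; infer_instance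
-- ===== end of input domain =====

-- B replaces A's per-window recount with one sliding-window pass that updates the count incrementally (objective: alternative).

-- ===== PORT A =====
-- arr[...] is ported with pyGetD (total surrogate); Pre_ excludes exactly the inputs where Python's arr[...] raises.
def swapAGo (arr : List Int) (k : Int) (p1 : Int) (m : Int) : Nat → Int
  | 0 => m
  | fuel + 1 =>
    let count := (PySem.List.pyRange 0 k 1).foldl
      (fun c i => if PySem.List.pyGetD arr (p1 + i) 0 == 1 then c + 1 else c) 0
    swapAGo arr k (p1 + 1) (if count < m then count else m) fuel

def swapBlackTilesNk (l : Int) (arr : List Int) (k : Int) : Int :=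
  -- 'while pointer2 < l' with pointer2 starting at k-1 and incremented once per pass: (l-(k-1)).toNat iterations
  swapAGo arr k 0 k (l - (k - 1)).toNat

-- ===== PORT B =====
def swapBlackTilesNk_alt (l : Int) (arr : List Int) (k : Int) : Int :=
  if 0 < k ∧ k ≤ l then
    let c0 := (PySem.List.slice arr none (some k)).foldl (fun c x => if x == 1 then c + 1 else c) 0
    let best0 := if c0 < k then c0 else k
    ((PySem.List.pyRange 1 (l - k + 1) 1).foldl
      (fun (s : Int × Int) p =>
        let c := s.1 + (if PySem.List.pyGetD arr (p + k - 1) 0 == 1 then (1:Int) else 0)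
                     - (if PySem.List.pyGetD arr (p - 1) 0 == 1 then (1:Int) else 0)
        (c, if c < s.2 then c else s.2)) (c0, best0)).2
  else k

-- ===== PRECONDITION & SPEC =====
-- A raises IndexError exactly when a window is scanned (0 < k ≤ l) but l exceeds the list length.
def Pre_swapBlackTilesNk (l : Int) (arr : List Int) (k : Int) : Prop :=
  (0 < k ∧ k ≤ l) → l ≤ (arr.length : Int)
instance (l : Int) (arr : List Int) (k : Int) : Decidable (Pre_swapBlackTilesNk l arr k) := by unfold Pre_swapBlackTilesNk; infer_instance
def pvWitness_swapBlackTilesNk : Int × List Int × Int := (3, [1, 0, 1], 2)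
def Spec_swapBlackTilesNk (l : Int) (arr : List Int) (k : Int) (out : Int) : Prop := out = swapBlackTilesNk_alt l arr k
instance (l : Int) (arr : List Int) (k : Int) (out : Int) : Decidable (Spec_swapBlackTilesNk l arr k out) := by unfold Spec_swapBlackTilesNk; infer_instance

-- ===== CLAIM (what is proved, stated in full; the proofs are below) =====
def Claim_equal_swapBlackTilesNk : Prop := ∀ (l : Int) (arr : List Int) (k : Int), Dom_swapBlackTilesNk l arr k → Pre_swapBlackTilesNk l arr k → Spec_swapBlackTilesNk l arr k (swapBlackTilesNk l arr k)

-- ===== LEMMAS AND PROOFS =====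
-- 0/1 indicator of 'arr[j] == 1' (total, via pyGetD)
def pvInd (arr : List Int) (j : Int) : Int := if PySem.List.pyGetD arr j 0 == 1 then 1 else 0

-- sum of indicators over the window [p, p+n)
def pvW (arr : List Int) (n : Nat) (p : Int) : Int :=
  ((List.range n).map (fun (i : Nat) => pvInd arr (p + (i : Int)))).sum

-- reference minimisation over n consecutive windows starting at p
def pvM (arr : List Int) (k : Int) : Nat → Int → Int → Int
  | 0, _, m => m
  | n + 1, p, m => pvM arr k n (p + 1) (if pvW arr k.toNat p < m then pvW arr k.toNat p else m)

theorem pvCount_eq (arr : List Int) (k p : Int) :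
    (PySem.List.pyRange 0 k 1).foldl
      (fun c i => if PySem.List.pyGetD arr (p + i) 0 == 1 then c + 1 else c) 0
    = pvW arr k.toNat p := by
  unfold pvW pvInd
  rw [PySem.List.sum_map_ite_one_zero (fun i : Nat => PySem.List.pyGetD arr (p + (i:Int)) 0 == 1) (List.range k.toNat)]
  rw [PySem.List.pyRange_one, PySem.List.foldl_count_if, List.countP_map]
  simp only [Function.comp_def, zero_add, Int.sub_zero]

theorem pvW_snoc (arr : List Int) (n : Nat) (q : Int) :
    pvW arr (n+1) q = pvW arr n q + pvInd arr (q + (n : Int)) := by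
  simp [pvW, List.range_succ]

theorem pvW_succ (arr : List Int) (n : Nat) (p : Int) :
    pvW arr n (p + 1) = pvW arr n p + pvInd arr (p + (n : Int)) - pvInd arr p := by
  induction n with
  | zero => simp [pvW]
  | succ n ih =>
    rw [pvW_snoc, pvW_snoc, ih]
    have h : p + 1 + (n : Int) = p + ((n : Int) + 1) := by ring
    rw [h]
    push_cast
    ring

theorem pvA_eq_pvM (arr : List Int) (k : Int) :
    ∀ (fuel : Nat) (p m : Int), swapAGo arr k p m fuel = pvM arr k fuel p m := by
  intro fuel
  induction fuel with
  | zero => intro p m; rfl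
  | succ n ih => intro p m; rw [swapAGo, pvM, pvCount_eq, ih]

theorem pvM_of_nonpos (arr : List Int) (k : Int) (hk : k ≤ 0) :
    ∀ (n : Nat) (p : Int), pvM arr k n p k = k := by
  intro n
  induction n with
  | zero => intro p; rfl
  | succ n ih =>
    intro p
    have hkt : k.toNat = 0 := Int.toNat_of_nonpos hk
    have hw : pvW arr k.toNat p = 0 := by simp [hkt, pvW]
    rw [pvM, hw]
    have : ¬ ((0:Int) < k) := by omega
    simp [this, ih]

theorem pvCountP_take : ∀ (n : Nat) (arr : List Int),
    List.countP (fun x => x == 1) (arr.take n)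
    = List.countP (fun (i : Nat) => PySem.List.pyGetD arr (i : Int) 0 == 1) (List.range n) := by
  intro n
  induction n with
  | zero => intro arr; rfl
  | succ n ih =>
    intro arr
    cases arr with
    | nil =>
      simp
    | cons x xs =>
      rw [List.take_succ_cons, List.countP_cons, List.range_succ_eq_map, List.countP_cons,
          List.countP_map, ih xs]
      simp [Function.comp_def]

theorem pvTake_count (arr : List Int) (n : Nat) :
    (arr.take n).foldl (fun c x => if x == 1 then c + 1 else c) 0 = pvW arr n 0 := by
  unfold pvW pvInd
  rw [PySem.List.sum_map_ite_one_zero (fun i : Nat => PySem.List.pyGetD arr (0 + (i:Int)) 0 == 1) (List.range n)]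
  rw [PySem.List.foldl_count_if, pvCountP_take n arr]
  simp

theorem pvB_fold (arr : List Int) (k : Int) (hk : 0 ≤ k) :
    ∀ (n : Nat) (a c best : Int), c = pvW arr k.toNat (a - 1) →
    ((PySem.List.pyRange a (a + (n : Int)) 1).foldl
      (fun (s : Int × Int) p =>
        let c := s.1 + (if PySem.List.pyGetD arr (p + k - 1) 0 == 1 then (1:Int) else 0)
                     - (if PySem.List.pyGetD arr (p - 1) 0 == 1 then (1:Int) else 0)
        (c, if c < s.2 then c else s.2)) (c, best)).2
    = pvM arr k n a best := by
  intro n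
  induction n with
  | zero =>
    intro a c best hc
    rw [show a + ((0:Nat):Int) = a by simp, PySem.List.pyRange_one_eq_nil (le_refl a)]
    rfl
  | succ n ih =>
    intro a c best hc
    have hlt : a < a + (((n+1) : Nat) : Int) := by push_cast; omega
    rw [PySem.List.pyRange_one_cons hlt, List.foldl_cons]
    simp only []
    have hC : c + (if PySem.List.pyGetD arr (a + k - 1) 0 == 1 then (1:Int) else 0)
                - (if PySem.List.pyGetD arr (a - 1) 0 == 1 then (1:Int) else 0)
              = pvW arr k.toNat a := by
      have h1 : a - 1 + 1 = a := by ring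
      have h2 : a - 1 + (k.toNat : Int) = a + k - 1 := by
        rw [Int.toNat_of_nonneg hk]; ring
      have hs := pvW_succ arr k.toNat (a - 1)
      rw [h1, h2] at hs
      rw [hs, hc]; unfold pvInd; ring
    rw [hC]
    have hrange : a + (((n+1):Nat) : Int) = (a + 1) + (n : Int) := by push_cast; ring
    rw [hrange, pvM]
    exact ih (a+1) _ _ (by rw [show a + 1 - 1 = a by ring])

theorem pvPorts_eq (l : Int) (arr : List Int) (k : Int) :
    swapBlackTilesNk l arr k = swapBlackTilesNk_alt l arr k := by
  unfold swapBlackTilesNk swapBlackTilesNk_alt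
  rw [pvA_eq_pvM]
  by_cases hcase : 0 < k ∧ k ≤ l
  · rw [if_pos hcase]
    obtain ⟨hk, hkl⟩ := hcase
    simp only []
    rw [PySem.List.slice_to arr (le_of_lt hk), pvTake_count]
    have hnB : (l - (k - 1)).toNat = (l - k).toNat + 1 := by omega
    rw [hnB, pvM]
    have hr : l - k + 1 = 1 + (((l - k).toNat : Int)) := by omega
    rw [hr]
    rw [show (0:Int) + 1 = 1 by ring]
    exact (pvB_fold arr k (le_of_lt hk) ((l-k).toNat) 1 _ _ (show pvW arr k.toNat 0 = pvW arr k.toNat (1 - 1) by norm_num)).symm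
  · rw [if_neg hcase]
    rcases (not_and_or.mp hcase) with hk | hkl
    · push Not at hk
      exact pvM_of_nonpos arr k hk _ _
    · push Not at hkl
      have : (l - (k - 1)).toNat = 0 := by omega
      rw [this]; rfl

-- ===== VERDICT (by name: the statement is the Claim_ definition above) =====
theorem swapBlackTilesNk_spec : Claim_equal_swapBlackTilesNk := by
  intro l arr k _ _
  unfold Spec_swapBlackTilesNk
  exact pvPorts_eq l arr k
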